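-- pv_equiv track=rewrite | github.com/TerenceChe/Tibia-bot | bot/messageFormat.py | colour
-- ===== SOURCE A (Python) =====
-- def colour(message: str) -> str:
--     colour_map = {
--     "Druid" : "\u001b[0;32mDruid\u001b[0;0m",
--     "Paladin" : "\u001b[0;33mPaladin\u001b[0;0m",
--     "Sorcerer" : "\u001b[0;34mSorcerer\u001b[0;0m",
--     "Knight" : "\u001b[0;31mKnight\u001b[0;0m",
--     }
--
--     for vocation in colour_map:
--         message = message.replace(vocation, colour_map.get(vocation))
--     return message
-- ===== SOURCE B (Python) =====
-- def colour(message: str) -> str: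
--     vocations = (("Druid", "32"), ("Paladin", "33"), ("Sorcerer", "34"), ("Knight", "31"))
--     out = []
--     i = 0
--     n = len(message)
--     while i < n:
--         for name, code in vocations:
--             if message.startswith(name, i):
--                 out.append("\u001b[0;" + code + "m" + name + "\u001b[0;0m")
--                 i += len(name)
--                 break
--         else:
--             out.append(message[i])
--             i += 1
--     return "".join(out)
-- ===== Notes on version B (the rewrite author's own statement) =====
-- stated objective: alternative
-- what changed: Replaces A's four sequential whole-string replace passes by one single left-to-right scan that tries the four vocation names at each position and emits the colourized form on a match; correctness rests on the names having pairwise distinct first characters and the inserted escape sequences containing no vocation name start.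
import Mathlib
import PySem

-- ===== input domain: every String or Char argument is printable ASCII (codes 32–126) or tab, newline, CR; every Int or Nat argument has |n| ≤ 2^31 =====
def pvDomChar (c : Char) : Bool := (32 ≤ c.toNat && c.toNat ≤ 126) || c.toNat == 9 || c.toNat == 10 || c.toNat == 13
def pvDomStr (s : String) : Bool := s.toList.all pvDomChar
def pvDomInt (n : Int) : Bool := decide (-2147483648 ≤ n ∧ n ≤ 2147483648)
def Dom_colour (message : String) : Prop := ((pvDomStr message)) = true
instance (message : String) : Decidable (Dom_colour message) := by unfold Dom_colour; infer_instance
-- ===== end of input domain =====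

set_option maxRecDepth 4096
set_option maxHeartbeats 1000000


-- B replaces A's four sequential whole-string replace passes by one single left-to-right
-- scan trying the four vocation names at each position (objective: alternative algorithm).

-- ===== PORT A =====
def colourMap : PySem.Dict String String :=
  PySem.Dict.ofList
  [("Druid", "\u001B[0;32mDruid\u001B[0;0m"),
   ("Paladin", "\u001B[0;33mPaladin\u001B[0;0m"),
   ("Sorcerer", "\u001B[0;34mSorcerer\u001B[0;0m"),
   ("Knight", "\u001B[0;31mKnight\u001B[0;0m")]

-- 'for vocation in colour_map: message = message.replace(vocation, colour_map.get(vocation))'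
-- (every key is present, so .get's value is exact; getD's default is never used)
def colour (message : String) : String :=
  (PySem.Dict.keys colourMap).foldl
    (fun m vocation => PySem.Str.replace m vocation (PySem.Dict.getD colourMap vocation ""))
    message

-- ===== PORT B =====
-- the four vocation names and their colourized forms, as char lists
def dD : List Char := "Druid".toList
def dP : List Char := "Paladin".toList
def dS : List Char := "Sorcerer".toList
def dK : List Char := "Knight".toList
def cD : List Char := "\u001B[0;32mDruid\u001B[0;0m".toList
def cP : List Char := "\u001B[0;33mPaladin\u001B[0;0m".toList
def cS : List Char := "\u001B[0;34mSorcerer\u001B[0;0m".toList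
def cK : List Char := "\u001B[0;31mKnight\u001B[0;0m".toList

-- B's single pass: at each position try the four names in order, else copy one char
def scanAll : List Char → List Char
  | [] => []
  | c :: t =>
    if dD.isPrefixOf (c :: t) then cD ++ scanAll (t.drop 4)
    else if dP.isPrefixOf (c :: t) then cP ++ scanAll (t.drop 6)
    else if dS.isPrefixOf (c :: t) then cS ++ scanAll (t.drop 7)
    else if dK.isPrefixOf (c :: t) then cK ++ scanAll (t.drop 5)
    else c :: scanAll t
termination_by l => l.length
decreasing_by all_goals (simp; try omega)

def colour_alt (message : String) : String := String.ofList (scanAll message.toList)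

-- ===== PRECONDITION & SPEC =====
def Spec_colour (message : String) (out : String) : Prop := out = colour_alt message
instance (message : String) (out : String) : Decidable (Spec_colour message out) := by unfold Spec_colour; infer_instance

-- ===== CLAIM (what is proved, stated in full; the proofs are below) =====
def Claim_equal_colour : Prop := ∀ (message : String), Dom_colour message → Spec_colour message (colour message)

-- ===== LEMMAS AND PROOFS =====

-- one replace pass, as a structural scan (proof-side model of PySem.Chars.replace)
def scan1 (p r : List Char) : List Char → List Char
  | [] => []
  | c :: t =>
    if p.isPrefixOf (c :: t) then r ++ scan1 p r (t.drop (p.length - 1))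
    else c :: scan1 p r t
termination_by l => l.length
decreasing_by all_goals (simp; try omega)

theorem go_eq (old new : List Char) (hold : old ≠ []) :
    ∀ fuel l acc, l.length ≤ fuel →
      PySem.Chars.replace.go old new fuel l acc = acc.reverse ++ scan1 old new l := by
  intro fuel
  induction fuel with
  | zero =>
    intro l acc h
    cases l with
    | nil => simp [PySem.Chars.replace.go, scan1]
    | cons c t => simp at h
  | succ n ih =>
    intro l acc h
    cases l with
    | nil => simp [PySem.Chars.replace.go, scan1]
    | cons c t =>
      rw [PySem.Chars.replace.go]
      by_cases hp : old.isPrefixOf (c :: t)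
      · rw [if_pos hp]
        rw [scan1, if_pos hp]
        have hlen : old.length ≤ (c :: t).length :=
          (List.isPrefixOf_iff_prefix.mp hp).length_le
        have h1 : 1 ≤ old.length := by
          cases old with
          | nil => exact absurd rfl hold
          | cons _ _ => simp
        have hd : List.drop old.length (c :: t) = t.drop (old.length - 1) := by
          cases old with
          | nil => exact absurd rfl hold
          | cons o ot => simp
        rw [hd, ih _ _ (by simp at h ⊢; omega)]
        simp
      · rw [if_neg hp, scan1, if_neg hp, ih t (c :: acc) (by simp at h ⊢; omega)]
        simp

theorem replace_eq_scan1 (s old new : List Char) (hold : old ≠ []) :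
    PySem.Chars.replace s old new = scan1 old new s := by
  rw [PySem.Chars.replace, if_neg (by simp [hold]),
    go_eq old new hold s.length s [] (le_refl _)]
  simp

-- a pass whose replacement starts with ESC cannot create an occurrence of an ESC-free word
theorem scan1_no_create (p r : List Char) (hr : r.head? = some '\u001B') :
    ∀ (X q : List Char), '\u001B' ∉ q → ¬ q <+: X → ¬ q <+: scan1 p r X := by
  intro X
  induction X with
  | nil => intro q hq h; simpa [scan1] using h
  | cons c t ih =>
    intro q hq h hcon
    rw [scan1] at hcon
    by_cases hpre : p.isPrefixOf (c :: t)
    · rw [if_pos hpre] at hcon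
      cases r with
      | nil => simp at hr
      | cons r0 rt =>
        simp at hr
        subst hr
        cases q with
        | nil => exact h List.nil_prefix
        | cons q0 qt =>
          rw [List.cons_append] at hcon
          have := (List.cons_prefix_cons.mp hcon).1
          subst this
          simp at hq
    · rw [if_neg hpre] at hcon
      cases q with
      | nil => exact h List.nil_prefix
      | cons q0 qt =>
        obtain ⟨h1, h2⟩ := List.cons_prefix_cons.mp hcon
        subst h1
        exact ih qt (by simp at hq; exact hq.2)
          (fun hh => h (List.cons_prefix_cons.mpr ⟨rfl, hh⟩)) h2

-- a pass walks over a block that contains no head char of its pattern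
theorem scan1_append_skip (p r a b : List Char) (hp : p ≠ [])
    (ha : ∀ x ∈ a, p.head? ≠ some x) :
    scan1 p r (a ++ b) = a ++ scan1 p r b := by
  induction a with
  | nil => simp
  | cons x a' ih =>
    have hnp : ¬ p.isPrefixOf (x :: (a' ++ b)) = true := by
      intro hpre
      have hpre' := List.isPrefixOf_iff_prefix.mp hpre
      cases p with
      | nil => exact hp rfl
      | cons p0 pt =>
        have := (List.cons_prefix_cons.mp hpre').1
        exact ha x (by simp) (by simp [this])
    rw [List.cons_append, scan1, if_neg hnp, ih (fun y hy => ha y (by simp [hy]))]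
    simp

-- a pass consumes its own pattern at the head
theorem scan1_self_append (p r b : List Char) (hp : p ≠ []) :
    scan1 p r (p ++ b) = r ++ scan1 p r b := by
  cases p with
  | nil => exact absurd rfl hp
  | cons p0 pt =>
    rw [List.cons_append, scan1,
      if_pos (List.isPrefixOf_iff_prefix.mpr ⟨b, by simp⟩)]
    congr 1
    rw [show (p0 :: pt).length - 1 = pt.length by simp, List.drop_left]

-- an ESC-headed pass cannot make a name appear after an untouched head char
theorem no_create_cons (p r name : List Char) (hr : r.head? = some '\u001B')
    (hname : '\u001B' ∉ name) (c : Char) (X : List Char)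
    (h : ¬ name <+: c :: X) : ¬ name <+: c :: scan1 p r X := by
  cases name with
  | nil => exact absurd List.nil_prefix h
  | cons n0 nt =>
    intro hcon
    obtain ⟨h1, h2⟩ := List.cons_prefix_cons.mp hcon
    subst h1
    exact scan1_no_create p r hr X nt (by simp at hname; exact hname.2)
      (fun hh => h (List.cons_prefix_cons.mpr ⟨rfl, hh⟩)) h2

-- scanAll on a name at the head
theorem scanAll_D (l : List Char) : scanAll (dD ++ l) = cD ++ scanAll l := by
  have h : dD.isPrefixOf ('D' :: (['r','u','i','d'] ++ l)) = true :=
    List.isPrefixOf_iff_prefix.mpr ⟨l, rfl⟩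
  rw [show dD ++ l = 'D' :: (['r','u','i','d'] ++ l) from rfl, scanAll, if_pos h]
  rw [show (4:Nat) = (['r','u','i','d'] : List Char).length from rfl, List.drop_left]

theorem scanAll_P (l : List Char) : scanAll (dP ++ l) = cP ++ scanAll l := by
  have h : dP.isPrefixOf ('P' :: (['a','l','a','d','i','n'] ++ l)) = true :=
    List.isPrefixOf_iff_prefix.mpr ⟨l, rfl⟩
  have nD : ¬ dD.isPrefixOf ('P' :: (['a','l','a','d','i','n'] ++ l)) = true := by
    simp [dD, List.isPrefixOf]
  rw [show dP ++ l = 'P' :: (['a','l','a','d','i','n'] ++ l) from rfl, scanAll, if_neg nD, if_pos h]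
  rw [show (6:Nat) = (['a','l','a','d','i','n'] : List Char).length from rfl, List.drop_left]

theorem scanAll_S (l : List Char) : scanAll (dS ++ l) = cS ++ scanAll l := by
  have h : dS.isPrefixOf ('S' :: (['o','r','c','e','r','e','r'] ++ l)) = true :=
    List.isPrefixOf_iff_prefix.mpr ⟨l, rfl⟩
  have nD : ¬ dD.isPrefixOf ('S' :: (['o','r','c','e','r','e','r'] ++ l)) = true := by
    simp [dD, List.isPrefixOf]
  have nP : ¬ dP.isPrefixOf ('S' :: (['o','r','c','e','r','e','r'] ++ l)) = true := by
    simp [dP, List.isPrefixOf]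
  rw [show dS ++ l = 'S' :: (['o','r','c','e','r','e','r'] ++ l) from rfl, scanAll, if_neg nD, if_neg nP, if_pos h]
  rw [show (7:Nat) = (['o','r','c','e','r','e','r'] : List Char).length from rfl, List.drop_left]

theorem scanAll_K (l : List Char) : scanAll (dK ++ l) = cK ++ scanAll l := by
  have h : dK.isPrefixOf ('K' :: (['n','i','g','h','t'] ++ l)) = true :=
    List.isPrefixOf_iff_prefix.mpr ⟨l, rfl⟩
  have nD : ¬ dD.isPrefixOf ('K' :: (['n','i','g','h','t'] ++ l)) = true := by
    simp [dD, List.isPrefixOf]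
  have nP : ¬ dP.isPrefixOf ('K' :: (['n','i','g','h','t'] ++ l)) = true := by
    simp [dP, List.isPrefixOf]
  have nS : ¬ dS.isPrefixOf ('K' :: (['n','i','g','h','t'] ++ l)) = true := by
    simp [dS, List.isPrefixOf]
  rw [show dK ++ l = 'K' :: (['n','i','g','h','t'] ++ l) from rfl, scanAll, if_neg nD, if_neg nP, if_neg nS, if_pos h]
  rw [show (5:Nat) = (['n','i','g','h','t'] : List Char).length from rfl, List.drop_left]

-- the four sequential passes equal the single scan
theorem chain_eq_aux : ∀ (n : Nat) (l : List Char), l.length ≤ n →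
    scan1 dK cK (scan1 dS cS (scan1 dP cP (scan1 dD cD l))) = scanAll l := by
  intro n
  induction n with
  | zero =>
    intro l h
    cases l with
    | nil => simp [scan1, scanAll]
    | cons c t => simp at h
  | succ n ih =>
    intro l hl
    by_cases hD : dD <+: l
    · obtain ⟨l', rfl⟩ := hD
      rw [scan1_self_append dD cD l' (by decide),
        scan1_append_skip dP cP cD _ (by decide) (by simp [cD, dP]),
        scan1_append_skip dS cS cD _ (by decide) (by simp [cD, dS]),
        scan1_append_skip dK cK cD _ (by decide) (by simp [cD, dK]),
        ih l' (by have h5 : dD.length = 5 := rfl; have h7 : dP.length = 7 := rfl; have h8 : dS.length = 8 := rfl; have h6 : dK.length = 6 := rfl; simp at hl ⊢; omega), scanAll_D]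
    · by_cases hP : dP <+: l
      · obtain ⟨l', rfl⟩ := hP
        rw [scan1_append_skip dD cD dP _ (by decide) (by simp [dP, dD]),
          scan1_self_append dP cP _ (by decide),
          scan1_append_skip dS cS cP _ (by decide) (by simp [cP, dS]),
          scan1_append_skip dK cK cP _ (by decide) (by simp [cP, dK]),
          ih l' (by have h5 : dD.length = 5 := rfl; have h7 : dP.length = 7 := rfl; have h8 : dS.length = 8 := rfl; have h6 : dK.length = 6 := rfl; simp at hl ⊢; omega), scanAll_P]
      · by_cases hS : dS <+: l
        · obtain ⟨l', rfl⟩ := hS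
          rw [scan1_append_skip dD cD dS _ (by decide) (by simp [dS, dD]),
            scan1_append_skip dP cP dS _ (by decide) (by simp [dS, dP]),
            scan1_self_append dS cS _ (by decide),
            scan1_append_skip dK cK cS _ (by decide) (by simp [cS, dK]),
            ih l' (by have h5 : dD.length = 5 := rfl; have h7 : dP.length = 7 := rfl; have h8 : dS.length = 8 := rfl; have h6 : dK.length = 6 := rfl; simp at hl ⊢; omega), scanAll_S]
        · by_cases hK : dK <+: l
          · obtain ⟨l', rfl⟩ := hK
            rw [scan1_append_skip dD cD dK _ (by decide) (by simp [dK, dD]),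
              scan1_append_skip dP cP dK _ (by decide) (by simp [dK, dP]),
              scan1_append_skip dS cS dK _ (by decide) (by simp [dK, dS]),
              scan1_self_append dK cK _ (by decide),
              ih l' (by have h5 : dD.length = 5 := rfl; have h7 : dP.length = 7 := rfl; have h8 : dS.length = 8 := rfl; have h6 : dK.length = 6 := rfl; simp at hl ⊢; omega), scanAll_K]
          · cases l with
            | nil => simp [scan1, scanAll]
            | cons c t =>
              have nD : ¬ dD.isPrefixOf (c :: t) = true :=
                fun hh => hD (List.isPrefixOf_iff_prefix.mp hh)
              have hP1 : ¬ dP <+: c :: scan1 dD cD t :=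
                no_create_cons dD cD dP (by decide) (by decide) c t hP
              have hS1 : ¬ dS <+: c :: scan1 dD cD t :=
                no_create_cons dD cD dS (by decide) (by decide) c t hS
              have hS2 : ¬ dS <+: c :: scan1 dP cP (scan1 dD cD t) :=
                no_create_cons dP cP dS (by decide) (by decide) c _ hS1
              have hK1 : ¬ dK <+: c :: scan1 dD cD t :=
                no_create_cons dD cD dK (by decide) (by decide) c t hK
              have hK2 : ¬ dK <+: c :: scan1 dP cP (scan1 dD cD t) :=
                no_create_cons dP cP dK (by decide) (by decide) c _ hK1
              have hK3 : ¬ dK <+: c :: scan1 dS cS (scan1 dP cP (scan1 dD cD t)) :=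
                no_create_cons dS cS dK (by decide) (by decide) c _ hK2
              rw [scan1, if_neg nD]
              rw [show scan1 dP cP (c :: scan1 dD cD t)
                  = c :: scan1 dP cP (scan1 dD cD t) from by
                rw [scan1, if_neg (fun hh => hP1 (List.isPrefixOf_iff_prefix.mp hh))]]
              rw [show scan1 dS cS (c :: scan1 dP cP (scan1 dD cD t))
                  = c :: scan1 dS cS (scan1 dP cP (scan1 dD cD t)) from by
                rw [scan1, if_neg (fun hh => hS2 (List.isPrefixOf_iff_prefix.mp hh))]]
              rw [show scan1 dK cK (c :: scan1 dS cS (scan1 dP cP (scan1 dD cD t)))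
                  = c :: scan1 dK cK (scan1 dS cS (scan1 dP cP (scan1 dD cD t))) from by
                rw [scan1, if_neg (fun hh => hK3 (List.isPrefixOf_iff_prefix.mp hh))]]
              rw [ih t (by simp at hl ⊢; omega)]
              rw [scanAll, if_neg nD,
                if_neg (fun hh => hP (List.isPrefixOf_iff_prefix.mp hh)),
                if_neg (fun hh => hS (List.isPrefixOf_iff_prefix.mp hh)),
                if_neg (fun hh => hK (List.isPrefixOf_iff_prefix.mp hh))]

theorem replace_toList (s o nw : String) (h : o.toList ≠ []) :
    (PySem.Str.replace s o nw).toList = scan1 o.toList nw.toList s.toList := by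
  rw [PySem.Str.toList_replace]
  exact replace_eq_scan1 _ _ _ h

-- ===== VERDICT (by name: the statement is the Claim_ definition above) =====
theorem colour_spec : Claim_equal_colour := by
  unfold Claim_equal_colour Spec_colour colour colour_alt
  intro message _
  rw [show PySem.Dict.keys colourMap = ["Druid", "Paladin", "Sorcerer", "Knight"] from by
        decide]
  simp only [List.foldl]
  rw [show PySem.Dict.getD colourMap "Druid" "" = "\u001B[0;32mDruid\u001B[0;0m" from by decide,
    show PySem.Dict.getD colourMap "Paladin" "" = "\u001B[0;33mPaladin\u001B[0;0m" from by decide,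
    show PySem.Dict.getD colourMap "Sorcerer" "" = "\u001B[0;34mSorcerer\u001B[0;0m" from by decide,
    show PySem.Dict.getD colourMap "Knight" "" = "\u001B[0;31mKnight\u001B[0;0m" from by decide]
  rw [PySem.Str.replace]
  refine congrArg String.ofList ?_
  rw [replace_eq_scan1 _ _ _ (by decide),
    replace_toList _ _ _ (by decide),
    replace_toList _ _ _ (by decide),
    replace_toList _ _ _ (by decide)]
  exact chain_eq_aux message.toList.length message.toList (le_refl _)
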